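-- pv_equiv track=rewrite | github.com/NewGoalhhs/DisaggregatePower | features/generate/dbToCSV.py | get_appliance_usage
-- ===== SOURCE A (Python) =====
-- def get_appliance_usage(row_id, appliance_usage_dict, appliances):
--     # Get the list of appliances in use for this row, default to an empty list if not found
--     appliance_ids_in_use = appliance_usage_dict.get(row_id, [])
--
--     # Initialize an empty list for the appliance usage
--     appliance_usage = []
--
--     # For each appliance id
--     for i in range(1, len(appliances) + 1):
--         # If the appliance id is in use, append a 1 to the list, otherwise append a 0
--         if i in appliance_ids_in_use:
--             appliance_usage.append(1)
--         else:
--             appliance_usage.append(0)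
--
--     # Return the list of appliance usage
--     return appliance_usage
-- ===== SOURCE B (Python) =====
-- def get_appliance_usage(row_id, appliance_usage_dict, appliances):
--     # Start from an all-zero vector and scatter 1s at the used appliance ids.
--     appliance_usage = [0] * len(appliances)
--     for i in appliance_usage_dict.get(row_id, []):
--         if 1 <= i <= len(appliances):
--             appliance_usage[i - 1] = 1
--     return appliance_usage
-- ===== Notes on version B (the rewrite author's own statement) =====
-- stated objective: alternative
-- what changed: A scans all n slots and tests membership of each index in the used-ids list; B starts from an all-zero vector and scatters a 1 at each in-range used id (one write per id), reversing the traversal.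
import Mathlib
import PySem

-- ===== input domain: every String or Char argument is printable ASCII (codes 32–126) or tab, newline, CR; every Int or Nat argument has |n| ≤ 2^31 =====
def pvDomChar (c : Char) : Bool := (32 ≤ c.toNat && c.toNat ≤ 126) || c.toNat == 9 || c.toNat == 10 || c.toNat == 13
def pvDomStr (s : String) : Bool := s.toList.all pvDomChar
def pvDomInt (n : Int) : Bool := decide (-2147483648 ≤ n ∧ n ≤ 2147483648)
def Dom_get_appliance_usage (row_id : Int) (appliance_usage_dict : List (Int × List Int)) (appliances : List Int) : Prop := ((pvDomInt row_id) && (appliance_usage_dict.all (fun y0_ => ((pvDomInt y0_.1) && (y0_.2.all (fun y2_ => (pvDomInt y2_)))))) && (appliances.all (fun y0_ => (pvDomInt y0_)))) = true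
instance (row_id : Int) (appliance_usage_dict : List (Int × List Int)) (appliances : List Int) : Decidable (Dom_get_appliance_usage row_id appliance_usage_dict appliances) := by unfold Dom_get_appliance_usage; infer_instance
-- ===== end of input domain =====

-- ===== PORT A =====
-- A: for each i in range(1, len(appliances)+1), append 1 if i is in the used-ids list else 0.
def get_appliance_usage (row_id : Int) (appliance_usage_dict : List (Int × List Int)) (appliances : List Int) : List Int :=
  let appliance_ids_in_use := ((appliance_usage_dict.lookup row_id).getD [])
  (PySem.List.pyRange 1 ((appliances.length : Int) + 1) 1).foldl
    (fun acc i => if i ∈ appliance_ids_in_use then acc ++ [(1 : Int)] else acc ++ [(0 : Int)]) []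

-- ===== PORT B =====
-- B: all-zero vector, then scatter a 1 at each in-range used id.
def get_appliance_usage_alt (row_id : Int) (appliance_usage_dict : List (Int × List Int)) (appliances : List Int) : List Int :=
  ((appliance_usage_dict.lookup row_id).getD []).foldl
    (fun acc i => if 1 ≤ i ∧ i ≤ (appliances.length : Int) then acc.set (i - 1).toNat 1 else acc)
    (List.replicate appliances.length (0 : Int))

-- ===== PRECONDITION & SPEC =====
def Spec_get_appliance_usage (row_id : Int) (appliance_usage_dict : List (Int × List Int)) (appliances : List Int) (out : List Int) : Prop := out = get_appliance_usage_alt row_id appliance_usage_dict appliances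
instance (row_id : Int) (appliance_usage_dict : List (Int × List Int)) (appliances : List Int) (out : List Int) : Decidable (Spec_get_appliance_usage row_id appliance_usage_dict appliances out) := by unfold Spec_get_appliance_usage; infer_instance

-- ===== CLAIM (what is proved, stated in full; the proofs are below) =====
def Claim_equal_get_appliance_usage : Prop := ∀ (row_id : Int) (appliance_usage_dict : List (Int × List Int)) (appliances : List Int), Dom_get_appliance_usage row_id appliance_usage_dict appliances → Spec_get_appliance_usage row_id appliance_usage_dict appliances (get_appliance_usage row_id appliance_usage_dict appliances)

-- ===== LEMMAS AND PROOFS =====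

def scatterF (n : Nat) : List Int → Int → List Int :=
  fun acc i => if 1 ≤ i ∧ i ≤ (n : Int) then acc.set (i - 1).toNat 1 else acc

lemma scatter_length (n : Nat) (used : List Int) (l : List Int) :
    (used.foldl (scatterF n) l).length = l.length := by
  induction used generalizing l with
  | nil => rfl
  | cons a t ih =>
      simp only [List.foldl_cons, ih, scatterF]
      split_ifs <;> simp

lemma scatter_getElem? (n : Nat) (used : List Int) (l : List Int) (j : Nat)
    (hl : l.length = n) (hj : j < n) :
    (used.foldl (scatterF n) l)[j]? =
      if ((j : Int) + 1) ∈ used then some 1 else l[j]? := by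
  induction used generalizing l with
  | nil => simp
  | cons a t ih =>
      have hfl : (scatterF n l a).length = n := by
        simp only [scatterF]; split_ifs <;> simp [hl]
      rw [List.foldl_cons, ih (scatterF n l a) hfl]
      by_cases hmem : ((j : Int) + 1) ∈ t
      · simp [hmem]
      · by_cases ha : a = (j : Int) + 1
        · have hin : 1 ≤ a ∧ a ≤ (n : Int) := by omega
          have : (a - 1).toNat = j := by omega
          simp [scatterF, ha, hmem, hl, hj]
        · have hne : a ≠ (j : Int) + 1 := ha
          have hmem' : ¬ ((j : Int) + 1) ∈ (a :: t) := by
            simp only [List.mem_cons, not_or]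
            exact ⟨fun h => hne h.symm, hmem⟩
          simp only [hmem', if_false, hmem]
          simp only [scatterF]
          split_ifs with hin
          · have : (a - 1).toNat ≠ j := by omega
            rw [List.getElem?_set_ne this]
          · rfl

lemma scatter_eq_map (n : Nat) (used : List Int) :
    used.foldl (scatterF n) (List.replicate n (0 : Int)) =
      (List.range n).map (fun (j : Nat) => if ((j : Int) + 1) ∈ used then (1 : Int) else 0) := by
  apply List.ext_getElem?
  intro j
  by_cases hj : j < n
  · rw [scatter_getElem? n used _ j (by simp) hj, List.getElem?_map, List.getElem?_range hj,
      List.getElem?_replicate]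
    simp only [hj, if_pos]
    split_ifs with h <;> simp [h]
  · have h1 : (used.foldl (scatterF n) (List.replicate n (0 : Int))).length ≤ j := by
      rw [scatter_length]; simp; omega
    have h2 : ((List.range n).map (fun (j : Nat) => if ((j : Int) + 1) ∈ used then (1 : Int) else 0)).length ≤ j := by
      simp; omega
    rw [List.getElem?_eq_none h1, List.getElem?_eq_none h2]

lemma range_map_succ (n : Nat) :
    PySem.List.pyRange 1 ((n : Int) + 1) 1 = (List.range n).map (fun (j : Nat) => ((j : Int) + 1)) := by
  rw [PySem.List.pyRange_one]
  have h : ((n : Int) + 1 - 1).toNat = n := by omega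
  rw [h]
  exact List.map_congr_left (fun a _ => by omega)

-- ===== VERDICT (by name: the statement is the Claim_ definition above) =====
theorem get_appliance_usage_spec : Claim_equal_get_appliance_usage := by
  intro row_id d apps _
  unfold Spec_get_appliance_usage get_appliance_usage get_appliance_usage_alt
  set used := ((d.lookup row_id).getD []) with hu
  have hB : used.foldl
      (fun acc i => if 1 ≤ i ∧ i ≤ (apps.length : Int) then acc.set (i - 1).toNat 1 else acc)
      (List.replicate apps.length (0 : Int)) =
      used.foldl (scatterF apps.length) (List.replicate apps.length (0 : Int)) := rfl
  rw [hB, scatter_eq_map, range_map_succ]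
  have : ∀ (acc : List Int) (xs : List Int),
      xs.foldl (fun acc i => if i ∈ used then acc ++ [(1:Int)] else acc ++ [(0:Int)]) acc
        = acc ++ xs.map (fun i => if i ∈ used then (1:Int) else 0) := by
    intro acc xs
    induction xs generalizing acc with
    | nil => simp
    | cons a t ih => simp only [List.foldl_cons, List.map_cons]; split_ifs <;> simp [ih]
  rw [this, List.map_map]
  simp
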